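-- pv_equiv track=rewrite | github.com/haming/project_euler | 54 Poker hands.py | ofAKind
-- ===== SOURCE A (Python) =====
-- def ofAKind(cards):
--     cardSorted = sorted(cards,key=lambda c:c[1])
--     maxKindNum = 0
--     maxKind = ''
--
--     kindNum = 0
--     currentKind = ''
--     for card in cardSorted:
--         if card[1]==currentKind:
--             kindNum += 1
--         else:
--             currentKind = card[1]
--             kindNum = 1
--         if kindNum>maxKindNum:
--             maxKindNum = kindNum
--             maxKind = currentKind
--
--     maxKindVals = []
--     for card in cardSorted:
--         if card[1]==maxKind:
--             maxKindVals.append(card[0])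
--     return maxKindNum,sorted(maxKindVals)
-- ===== SOURCE B (Python) =====
-- def ofAKind(cards):
--     groups = {}
--     for value, kind in cards:
--         groups.setdefault(kind, []).append(value)
--     if not groups:
--         return (0, [])
--     maxKindNum = max(len(vals) for vals in groups.values())
--     maxKind = min(k for k, vals in groups.items() if len(vals) == maxKindNum)
--     return (maxKindNum, sorted(groups[maxKind]))
-- ===== Notes on version B (the rewrite author's own statement) =====
-- stated objective: alternative
-- what changed: Instead of sorting the whole hand by rank and scanning runs twice, B builds a rank->values dict in one pass, takes the max group size with min-rank tie-break, and sorts only the winning group's values.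
import Mathlib
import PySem

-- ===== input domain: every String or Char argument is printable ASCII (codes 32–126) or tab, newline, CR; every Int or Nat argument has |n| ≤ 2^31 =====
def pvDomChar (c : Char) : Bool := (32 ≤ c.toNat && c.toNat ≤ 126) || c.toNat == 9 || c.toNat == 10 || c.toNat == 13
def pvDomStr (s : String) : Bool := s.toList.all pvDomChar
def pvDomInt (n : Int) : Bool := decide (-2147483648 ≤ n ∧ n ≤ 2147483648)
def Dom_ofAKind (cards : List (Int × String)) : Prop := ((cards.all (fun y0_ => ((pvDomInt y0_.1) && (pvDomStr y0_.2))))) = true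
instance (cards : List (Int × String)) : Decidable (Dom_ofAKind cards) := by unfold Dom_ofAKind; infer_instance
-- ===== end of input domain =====

-- B groups the values by rank in one dict pass instead of sorting the whole hand and
-- scanning runs twice; same result, including the smallest-rank tie-break.

-- ===== PORT A =====
-- one iteration of A's run-length scan over the rank-sorted list;
-- state = (maxKindNum, maxKind, kindNum, currentKind)
def stepA (st : Int × String × Int × String) (card : Int × String) : Int × String × Int × String :=
  let s2 : Int × String :=
    if card.2 == st.2.2.2 then (st.2.2.1 + 1, st.2.2.2) else (1, card.2)
  if s2.1 > st.1 then (s2.1, s2.2, s2.1, s2.2) else (st.1, st.2.1, s2.1, s2.2)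

def ofAKind (cards : List (Int × String)) : Int × List Int :=
  let cardSorted := PySem.List.sorted cards (fun c => c.2) false
  let st := cardSorted.foldl stepA (0, "", 0, "")
  let maxKindVals := cardSorted.foldl
    (fun acc card => if card.2 == st.2.1 then acc ++ [card.1] else acc) ([] : List Int)
  (st.1, PySem.List.sorted maxKindVals (fun v => v) false)

-- ===== PORT B =====
-- the grouping loop: 'for value, kind in cards: groups.setdefault(kind, []).append(value)'
def groupsB (cards : List (Int × String)) : PySem.Dict String (List Int) :=
  cards.foldl (fun d c => d.modify c.2 [] (fun vs => vs ++ [c.1])) PySem.Dict.empty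

def ofAKind_alt (cards : List (Int × String)) : Int × List Int :=
  let groups := groupsB cards
  if groups.items.isEmpty then (0, [])
  else
    let maxKindNum :=
      (PySem.List.max? (groups.values.map (fun vs => (vs.length : Int))) (fun x => x)).getD 0
    let maxKind :=
      (PySem.List.min?
        ((groups.items.filter (fun p => (p.2.length : Int) == maxKindNum)).map (·.1))
        (fun x => x)).getD ""
    (maxKindNum, PySem.List.sorted (groups.getD maxKind []) (fun v => v) false)

-- ===== PRECONDITION & SPEC =====
def Spec_ofAKind (cards : List (Int × String)) (out : Int × List Int) : Prop := out = ofAKind_alt cards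
instance (cards : List (Int × String)) (out : Int × List Int) : Decidable (Spec_ofAKind cards out) := by unfold Spec_ofAKind; infer_instance

-- ===== CLAIM (what is proved, stated in full; the proofs are below) =====
def Claim_equal_ofAKind : Prop := ∀ (cards : List (Int × String)), Dom_ofAKind cards → Spec_ofAKind cards (ofAKind cards)

-- ===== LEMMAS AND PROOFS =====

-- number of cards in p whose rank is r
def cntR (p : List (Int × String)) (r : String) : Nat := (p.filter (fun c => c.2 == r)).length

lemma cntR_append_singleton (p : List (Int × String)) (c : Int × String) (r : String) :
    cntR (p ++ [c]) r = cntR p r + (if c.2 = r then 1 else 0) := by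
  simp only [cntR, List.filter_append, List.length_append]
  split_ifs with h <;> simp [h]

lemma cntR_pos_of_mem {p : List (Int × String)} {c : Int × String} (h : c ∈ p) :
    0 < cntR p c.2 :=
  List.length_pos_of_mem (List.mem_filter.mpr ⟨h, by simp⟩)

lemma exists_of_cntR_pos {p : List (Int × String)} {r : String} (h : 0 < cntR p r) :
    ∃ c ∈ p, c.2 = r := by
  rcases List.exists_mem_of_length_pos h with ⟨c, hc⟩
  rcases List.mem_filter.mp hc with ⟨hmem, hr⟩
  exact ⟨c, hmem, by simpa using hr⟩

lemma cntR_perm {p q : List (Int × String)} (h : p.Perm q) (r : String) :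
    cntR p r = cntR q r :=
  (h.filter _).length_eq

-- invariant of A's scan after processing the prefix p of the rank-sorted list;
-- state st = (maxKindNum, maxKind, kindNum, currentKind)
def InvA (p : List (Int × String)) (st : Int × String × Int × String) : Prop :=
  st.2.2.1 = (cntR p st.2.2.2 : Int) ∧
  (∀ c ∈ p, c.2 ≤ st.2.2.2) ∧
  (p = [] ∨ ∃ c ∈ p, c.2 = st.2.2.2) ∧
  (∀ r, (cntR p r : Int) ≤ st.1) ∧
  ((st.1 = 0 ∧ st.2.1 = "" ∧ p = []) ∨
    ((cntR p st.2.1 : Int) = st.1 ∧ ∀ r, (cntR p r : Int) = st.1 → st.2.1 ≤ r))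

lemma stepA_eval_eq (M : Int) (mk : String) (kn : Int) (c : Int × String) :
    stepA (M, mk, kn, c.2) c =
      if M < kn + 1 then (kn + 1, c.2, kn + 1, c.2) else (M, mk, kn + 1, c.2) := by
  simp [stepA]

lemma stepA_eval_ne (M : Int) (mk : String) (kn : Int) (cur : String) (c : Int × String)
    (hc : ¬ c.2 = cur) :
    stepA (M, mk, kn, cur) c =
      if M < 1 then (1, c.2, 1, c.2) else (M, mk, 1, c.2) := by
  simp [stepA, hc]

lemma stepA_inv (p l : List (Int × String)) (c : Int × String)
    (hpw : (p ++ c :: l).Pairwise (fun a b => a.2 ≤ b.2))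
    (st : Int × String × Int × String) (h : InvA p st) :
    InvA (p ++ [c]) (stepA st c) := by
  obtain ⟨M, mk, kn, cur⟩ := st
  simp only [InvA] at h
  obtain ⟨h1, h2, h3, h4, h5⟩ := h
  have hge : ∀ c' ∈ p, c'.2 ≤ c.2 := by
    intro c' hc'
    exact (List.pairwise_append.mp hpw).2.2 c' hc' c (by simp)
  by_cases hc : c.2 = cur
  · -- the run continues
    subst hc
    have hkn : kn + 1 = (cntR (p ++ [c]) c.2 : Int) := by
      rw [cntR_append_singleton, if_pos rfl, h1]; push_cast; ring
    rw [stepA_eval_eq]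
    by_cases hK : M < kn + 1
    · rw [if_pos hK]
      refine ⟨hkn, ?_, ?_, ?_, ?_⟩
      · intro c' hc'
        rcases List.mem_append.mp hc' with h' | h'
        · exact h2 c' h'
        · simp at h'; simp [h']
      · exact Or.inr ⟨c, by simp, rfl⟩
      · intro r
        rw [cntR_append_singleton]
        by_cases hr : c.2 = r
        · subst hr; rw [if_pos rfl]; rw [h1] at hK ⊢; push_cast; omega
        · rw [if_neg hr]; have := h4 r; push_cast; omega
      · refine Or.inr ⟨hkn.symm, ?_⟩
        intro r hr
        rw [cntR_append_singleton] at hr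
        by_cases hr2 : c.2 = r
        · exact le_of_eq hr2
        · rw [if_neg hr2] at hr; have := h4 r; push_cast at hr; omega
    · rw [if_neg hK]
      have hM1 : kn + 1 ≤ M := by omega
      refine ⟨hkn, ?_, ?_, ?_, ?_⟩
      · intro c' hc'
        rcases List.mem_append.mp hc' with h' | h'
        · exact h2 c' h'
        · simp at h'; simp [h']
      · exact Or.inr ⟨c, by simp, rfl⟩
      · intro r
        rw [cntR_append_singleton]
        by_cases hr : c.2 = r
        · subst hr; rw [if_pos rfl]; rw [h1] at hM1; push_cast; omega
        · rw [if_neg hr]; have := h4 r; push_cast; omega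
      · rcases h5 with ⟨hM0, _, hp⟩ | ⟨ha, hb⟩
        · exfalso; subst hp; simp [cntR] at h1; omega
        · have hne : ¬ mk = c.2 := by
            intro he; rw [he] at ha; omega
          refine Or.inr ⟨?_, ?_⟩
          · rw [cntR_append_singleton, if_neg (fun he => hne he.symm)]; simpa using ha
          · intro r hr
            rw [cntR_append_singleton] at hr
            by_cases hr2 : c.2 = r
            · subst hr2
              have hpos : 0 < cntR p mk := by omega
              obtain ⟨c', hc', he⟩ := exists_of_cntR_pos hpos
              rw [← he]; exact hge c' hc'
            · rw [if_neg hr2] at hr; push_cast at hr; exact hb r (by omega)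
  · -- the rank changes: it cannot have been seen before
    have hzero : cntR p c.2 = 0 := by
      by_contra hz
      obtain ⟨c', hc', he⟩ := exists_of_cntR_pos (Nat.pos_of_ne_zero hz)
      rcases h3 with hp | ⟨w, hw, hwe⟩
      · subst hp; simp at hc'
      · have h2' : c.2 ≤ cur := he ▸ h2 c' hc'
        have h1' : cur ≤ c.2 := hwe ▸ hge w hw
        exact hc (le_antisymm h2' h1')
    have hkn : (1 : Int) = (cntR (p ++ [c]) c.2 : Int) := by
      rw [cntR_append_singleton, if_pos rfl, hzero]; simp
    rw [stepA_eval_ne _ _ _ _ _ hc]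
    by_cases hK : M < 1
    · rw [if_pos hK]
      refine ⟨hkn, ?_, ?_, ?_, ?_⟩
      · intro c' hc'
        rcases List.mem_append.mp hc' with h' | h'
        · exact hge c' h'
        · simp at h'; simp [h']
      · exact Or.inr ⟨c, by simp, rfl⟩
      · intro r
        rw [cntR_append_singleton]
        by_cases hr : c.2 = r
        · subst hr; rw [if_pos rfl, hzero]; simp
        · rw [if_neg hr]; have := h4 r; push_cast; omega
      · refine Or.inr ⟨hkn.symm, ?_⟩
        intro r hr
        rw [cntR_append_singleton] at hr
        by_cases hr2 : c.2 = r
        · exact le_of_eq hr2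
        · rw [if_neg hr2] at hr; have := h4 r; push_cast at hr; omega
    · rw [if_neg hK]
      have hM1 : 1 ≤ M := by omega
      rcases h5 with ⟨hM0, _, _⟩ | ⟨ha, hb⟩
      · omega
      refine ⟨hkn, ?_, ?_, ?_, ?_⟩
      · intro c' hc'
        rcases List.mem_append.mp hc' with h' | h'
        · exact hge c' h'
        · simp at h'; simp [h']
      · exact Or.inr ⟨c, by simp, rfl⟩
      · intro r
        rw [cntR_append_singleton]
        by_cases hr : c.2 = r
        · subst hr; rw [if_pos rfl, hzero]; simpa using hM1
        · rw [if_neg hr]; have := h4 r; push_cast; omega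
      · have hne : ¬ mk = c.2 := by
          intro he
          rw [he, hzero] at ha; push_cast at ha; omega
        refine Or.inr ⟨?_, ?_⟩
        · rw [cntR_append_singleton, if_neg (fun he => hne he.symm)]; simpa using ha
        · intro r hr
          rw [cntR_append_singleton] at hr
          by_cases hr2 : c.2 = r
          · subst hr2
            have hpos : 0 < cntR p mk := by omega
            obtain ⟨c', hc', he⟩ := exists_of_cntR_pos hpos
            rw [← he]; exact hge c' hc'
          · rw [if_neg hr2] at hr; push_cast at hr; exact hb r (by omega)

lemma foldl_stepA_inv (l : List (Int × String)) :
    ∀ (p : List (Int × String)) (st : Int × String × Int × String),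
    (p ++ l).Pairwise (fun a b => a.2 ≤ b.2) → InvA p st → InvA (p ++ l) (l.foldl stepA st) := by
  induction l with
  | nil => intro p st _ h; simpa using h
  | cons c l ih =>
    intro p st hpw h
    have h1 : (p ++ [c] ++ l).Pairwise (fun a b => a.2 ≤ b.2) := by
      simpa [List.append_assoc] using hpw
    have := ih (p ++ [c]) (stepA st c) h1 (stepA_inv p l c hpw st h)
    simpa [List.append_assoc] using this

-- named pieces of the two computations
def sA (cards : List (Int × String)) : List (Int × String) :=
  PySem.List.sorted cards (fun c => c.2) false

def stA (cards : List (Int × String)) : Int × String × Int × String :=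
  (sA cards).foldl stepA (0, "", 0, "")

lemma A_char (cards : List (Int × String)) :
    ofAKind cards = ((stA cards).1,
      PySem.List.sorted (((sA cards).filter (fun c => c.2 == (stA cards).2.1)).map (·.1))
        (fun v => v) false) := by
  simp only [ofAKind, stA, sA]
  rw [PySem.List.foldl_append_if]
  simp

def lensB (cards : List (Int × String)) : List Int :=
  (groupsB cards).values.map (fun vs => (vs.length : Int))

def nB (cards : List (Int × String)) : Int :=
  (PySem.List.max? (lensB cards) (fun x => x)).getD 0

def kB (cards : List (Int × String)) : String :=
  (PySem.List.min?
    (((groupsB cards).items.filter (fun p => (p.2.length : Int) == nB cards)).map (·.1))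
    (fun x => x)).getD ""

lemma B_char (cards : List (Int × String)) (h : (groupsB cards).items ≠ []) :
    ofAKind_alt cards = (nB cards,
      PySem.List.sorted ((groupsB cards).getD (kB cards) []) (fun v => v) false) := by
  simp only [ofAKind_alt, nB, kB, lensB]
  rw [if_neg (by simpa using h)]

lemma groupsB_getD (cards : List (Int × String)) (r : String) :
    (groupsB cards).getD r [] = (cards.filter (fun c => c.2 == r)).map (·.1) := by
  have : groupsB cards =
      (cards.map (fun c => (c.2, c.1))).foldl
        (fun d p => d.modify p.1 [] (fun vs => vs ++ [p.2])) PySem.Dict.empty := by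
    simp only [groupsB]; rw [List.foldl_map]
  rw [this, PySem.Dict.getD_foldl_modify_append]
  simp [List.filter_map, List.map_map, Function.comp_def]

lemma groupsB_keys (cards : List (Int × String)) :
    (groupsB cards).keys = PySem.Set.ofList (cards.map (·.2)) := by
  simp only [groupsB]
  rw [PySem.Dict.keys_foldl_modify_key]
  rfl

lemma groupsB_nodup (cards : List (Int × String)) : (groupsB cards).keys.Nodup := by
  rw [groupsB_keys]
  exact PySem.Set.nodup_ofList _

lemma main_eq (cards : List (Int × String)) : ofAKind cards = ofAKind_alt cards := by
  by_cases hnil : cards = []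
  · subst hnil; rfl
  · -- shared facts
    have hget : ∀ r, (groupsB cards).getD r [] = (cards.filter (fun c => c.2 == r)).map (·.1) :=
      groupsB_getD cards
    have hglen : ∀ r, ((groupsB cards).getD r []).length = cntR cards r := by
      intro r; rw [hget]; simp [cntR]
    have hkeys : (groupsB cards).keys = PySem.Set.ofList (cards.map (·.2)) := groupsB_keys cards
    have hnd : (groupsB cards).keys.Nodup := groupsB_nodup cards
    have hmemkeys : ∀ r, r ∈ (groupsB cards).keys ↔ ∃ c ∈ cards, c.2 = r := by
      intro r; rw [hkeys, PySem.Set.mem_ofList]; simp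
    have hKne : (groupsB cards).keys ≠ [] := by
      obtain ⟨c0, rest, rfl⟩ := List.exists_cons_of_ne_nil hnil
      exact List.ne_nil_of_mem ((hmemkeys c0.2).mpr ⟨c0, by simp, rfl⟩)
    have hitemsne : (groupsB cards).items ≠ [] := by
      intro h
      apply hKne
      have : (groupsB cards).keys = (groupsB cards).items.map (·.1) := rfl
      rw [this, h]
      rfl
    -- A's scan invariant
    have hpw : (sA cards).Pairwise (fun a b => a.2 ≤ b.2) := PySem.List.sorted_pairwise _ _
    have hperm : (sA cards).Perm cards := PySem.List.sorted_perm _ _ _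
    have hcnt : ∀ r, cntR (sA cards) r = cntR cards r := cntR_perm hperm
    have hinv0 : InvA [] (0, "", 0, "") := by
      refine ⟨by simp [cntR], by simp, Or.inl rfl, by simp [cntR], Or.inl ⟨rfl, rfl, rfl⟩⟩
    have hinv : InvA (sA cards) (stA cards) := by
      have := foldl_stepA_inv (sA cards) [] (0, "", 0, "") (by simpa using hpw) hinv0
      simpa [stA] using this
    obtain ⟨h1, h2, h3, h4, h5⟩ := hinv
    have hsne : (sA cards) ≠ [] := by
      simpa [sA, PySem.List.sorted_eq_nil_iff] using hnil
    rcases h5 with ⟨_, _, hp⟩ | ⟨ha, hb⟩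
    · exact absurd hp hsne
    -- M ≥ 1
    have hM1 : 1 ≤ (stA cards).1 := by
      obtain ⟨c0, rest, hc⟩ := List.exists_cons_of_ne_nil hnil
      have hpos : 0 < cntR cards c0.2 := cntR_pos_of_mem (by rw [hc]; simp)
      have := h4 c0.2
      rw [hcnt c0.2] at this
      omega
    -- mk ∈ keys
    have hmkcnt : (cntR cards (stA cards).2.1 : Int) = (stA cards).1 := by
      rw [← hcnt]; exact ha
    have hmkpos : 0 < cntR cards (stA cards).2.1 := by omega
    have hmkmem : (stA cards).2.1 ∈ (groupsB cards).keys := by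
      rw [hmemkeys]
      exact exists_of_cntR_pos hmkpos
    -- the lens list
    have hlens : lensB cards = (groupsB cards).keys.map (fun k => (cntR cards k : Int)) := by
      rw [lensB, PySem.Dict.values_eq_map_keys _ hnd [], List.map_map]
      exact List.map_congr_left (fun k _ => by simp [Function.comp, hglen k])
    have hlensne : lensB cards ≠ [] := by
      rw [hlens]
      simpa using hKne
    obtain ⟨n, hn⟩ : ∃ n, PySem.List.max? (lensB cards) (fun x => x) = some n := by
      cases hmm : PySem.List.max? (lensB cards) (fun x => x) with
      | none => exact absurd ((PySem.List.max?_eq_none_iff _ _).mp hmm) hlensne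
      | some n => exact ⟨n, rfl⟩
    have hnB : nB cards = n := by rw [nB, hn]; rfl
    have hnmem : n ∈ lensB cards := PySem.List.max?_mem hn
    have hnmax : ∀ y ∈ lensB cards, y ≤ n := PySem.List.max?_isMax hn
    -- n = M
    have hnM : n = (stA cards).1 := by
      rw [hlens] at hnmem hnmax
      obtain ⟨k0, hk0, hk0e⟩ := List.mem_map.mp hnmem
      have hle : n ≤ (stA cards).1 := by
        rw [← hk0e, ← hcnt k0]; exact h4 k0
      have hge : (stA cards).1 ≤ n :=
        hmkcnt ▸ hnmax _ (List.mem_map.mpr ⟨(stA cards).2.1, hmkmem, rfl⟩)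
      omega
    -- the filtered key list
    have hflist :
        ((groupsB cards).items.filter (fun p => (p.2.length : Int) == nB cards)).map (·.1)
          = (groupsB cards).keys.filter (fun k => (cntR cards k : Int) == n) := by
      rw [PySem.Dict.items_eq_map_keys _ hnd [], List.filter_map]
      have hpt : ∀ k ∈ (groupsB cards).keys,
          ((fun p => ((p.2.length : Int) == nB cards)) ∘ fun k => (k, (groupsB cards).getD k [])) k
            = ((cntR cards k : Int) == n) := by
        intro k _
        simp [hglen k, hnB]
      rw [List.filter_congr hpt]
      simp [Function.comp_def]
    have hmkfl : (stA cards).2.1 ∈ (groupsB cards).keys.filter (fun k => (cntR cards k : Int) == n) := by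
      rw [List.mem_filter]
      exact ⟨hmkmem, by simp [hmkcnt, hnM]⟩
    obtain ⟨k1, hk1⟩ : ∃ k1, PySem.List.min?
        (((groupsB cards).items.filter (fun p => (p.2.length : Int) == nB cards)).map (·.1))
        (fun x => x) = some k1 := by
      cases hmm : PySem.List.min?
          (((groupsB cards).items.filter (fun p => (p.2.length : Int) == nB cards)).map (·.1))
          (fun x => x) with
      | none =>
        exfalso
        have := (PySem.List.min?_eq_none_iff _ _).mp hmm
        rw [hflist] at this
        rw [this] at hmkfl
        simp at hmkfl
      | some k1 => exact ⟨k1, rfl⟩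
    have hkB : kB cards = k1 := by rw [kB, hk1]; rfl
    have hk1mem := PySem.List.min?_mem hk1
    have hk1min := PySem.List.min?_isMin hk1
    rw [hflist] at hk1mem hk1min
    have hk1cnt : (cntR cards k1 : Int) = n := by
      have := (List.mem_filter.mp hk1mem).2
      simpa using this
    -- k1 = mk
    have hkmk : k1 = (stA cards).2.1 := by
      have hle1 : k1 ≤ (stA cards).2.1 := hk1min _ hmkfl
      have hle2 : (stA cards).2.1 ≤ k1 := by
        apply hb
        rw [hcnt, hk1cnt, hnM]
      exact le_antisymm hle1 hle2
    -- assemble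
    rw [A_char, B_char cards hitemsne, Prod.mk.injEq]
    constructor
    · rw [hnB, hnM]
    · rw [hget, hkB, hkmk]
      apply PySem.List.sorted_eq_sorted_of_perm
      · exact fun a b hab => hab
      · exact (hperm.filter _).map _

-- ===== VERDICT (by name: the statement is the Claim_ definition above) =====
theorem ofAKind_spec : Claim_equal_ofAKind := by
  intro cards _
  unfold Spec_ofAKind
  exact main_eq cards
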